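-- pv_equiv track=rewrite | github.com/6democratickim9/study_algo | map.py | solution
-- ===== SOURCE A (Python) =====
-- def solution(n, arr1, arr2):
--     tmp=''
--     answer=[]
--     ans1=[]
--     ans2=[]
--     for val in range(0,n) :
--         ans1.append(bin(arr1[val])[2:].zfill(n))
--         ans2.append(bin(arr2[val])[2:].zfill(n))
--
--     for place in range(0,n):
--         tmp=''
--         for idx in range(0,n):
--             if int(ans1[place][idx])+int(ans2[place][idx])>=1:
--                 tmp+='#'
--             else:tmp+=' '
--         answer.append(tmp)
--
--     return answer
-- ===== SOURCE B (Python) =====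
-- def solution(n, arr1, arr2):
--     answer = []
--     for i in range(n):
--         row = arr1[i] | arr2[i]
--         answer.append(''.join('#' if (row >> (n - 1 - j)) & 1 else ' ' for j in range(n)))
--     return answer
-- ===== Notes on version B (the rewrite author's own statement) =====
-- stated objective: simpler
-- what changed: B drops A's binary-string machinery (bin/zfill string lists and the per-digit int()+int()>=1 comparison) and computes each row as the integer OR arr1[i]|arr2[i], rendering cells by single bit tests; Pre_ excludes values needing more than n bits (not n-bit rows, where A's reading of the leading n characters of an over-long string and B's low-n-bits reading are both unspecified) and inputs where A raises (negative values, arrays shorter than n).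
-- outside the precondition, e.g. on solution(1, [2], [0]): A returns ['#'], B returns [' ']
import Mathlib
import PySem

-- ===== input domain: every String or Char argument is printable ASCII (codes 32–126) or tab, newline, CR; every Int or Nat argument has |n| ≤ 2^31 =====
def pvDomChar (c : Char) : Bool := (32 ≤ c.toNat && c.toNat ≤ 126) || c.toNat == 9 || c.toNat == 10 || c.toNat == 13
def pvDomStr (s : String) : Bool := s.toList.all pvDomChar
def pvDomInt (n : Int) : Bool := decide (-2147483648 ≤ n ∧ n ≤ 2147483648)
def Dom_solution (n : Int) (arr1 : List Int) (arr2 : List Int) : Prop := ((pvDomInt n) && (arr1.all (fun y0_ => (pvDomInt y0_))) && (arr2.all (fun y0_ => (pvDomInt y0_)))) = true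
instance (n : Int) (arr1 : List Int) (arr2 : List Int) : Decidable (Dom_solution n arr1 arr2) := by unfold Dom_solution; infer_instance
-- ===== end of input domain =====

-- B replaces A's binary-string machinery (bin/zfill string lists, per-digit int()+int()>=1)
-- by one integer OR per row and a bit test per cell — a simpler rendering of the same map.


-- ===== PORT A =====
def solution (n : Int) (arr1 : List Int) (arr2 : List Int) : List String :=
  -- ans1, ans2 built in one loop over range(0, n); rows kept as their character lists
  let p := (PySem.List.pyRange 0 n 1).foldl
    (fun (st : List (List Char) × List (List Char)) val =>
      (st.1 ++ [PySem.Chars.zfill (PySem.List.slice (PySem.Int.toBinChars0b (PySem.List.pyGetD arr1 val 0)) (some 2) none) n],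
       st.2 ++ [PySem.Chars.zfill (PySem.List.slice (PySem.Int.toBinChars0b (PySem.List.pyGetD arr2 val 0)) (some 2) none) n]))
    ([], [])
  let ans1 := p.1
  let ans2 := p.2
  (PySem.List.pyRange 0 n 1).foldl (fun answer place =>
    let tmp := (PySem.List.pyRange 0 n 1).foldl (fun tmp idx =>
      if (PySem.Int.ofChars? [PySem.List.pyGetD (PySem.List.pyGetD ans1 place []) idx ' ']).getD 0
         + (PySem.Int.ofChars? [PySem.List.pyGetD (PySem.List.pyGetD ans2 place []) idx ' ']).getD 0 ≥ 1
      then tmp ++ ['#'] else tmp ++ [' ']) []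
    answer ++ [String.mk tmp]) []

-- ===== PORT B =====
def solution_alt (n : Int) (arr1 : List Int) (arr2 : List Int) : List String :=
  (PySem.List.pyRange 0 n 1).foldl (fun answer i =>
    let row := PySem.Int.bor (PySem.List.pyGetD arr1 i 0) (PySem.List.pyGetD arr2 i 0)
    answer ++ [String.mk ((PySem.List.pyRange 0 n 1).map
      (fun j => if PySem.Int.band (row >>> (n - 1 - j).toNat) 1 ≠ 0 then '#' else ' '))]) []

-- ===== PRECONDITION & SPEC =====
-- Pre_ excludes (a) inputs where A raises — n > len(arr1) or n > len(arr2) (IndexError), a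
-- negative value among the first n of either array (bin gives '-…', int('b'/'-') → ValueError) —
-- and (b) values among the first n needing more than n bits: those are not n-bit map rows, and
-- there A's reading of the leading n characters of the over-long binary string and B's reading of
-- the low n bits are two choices on a corner the task never specifies.
def Pre_solution (n : Int) (arr1 : List Int) (arr2 : List Int) : Prop :=
  n ≤ (arr1.length : Int) ∧ n ≤ (arr2.length : Int) ∧
  (∀ x ∈ arr1.take n.toNat, 0 ≤ x ∧ (PySem.Int.bitLength x : Int) ≤ n) ∧
  (∀ x ∈ arr2.take n.toNat, 0 ≤ x ∧ (PySem.Int.bitLength x : Int) ≤ n)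
instance (n : Int) (arr1 : List Int) (arr2 : List Int) : Decidable (Pre_solution n arr1 arr2) := by unfold Pre_solution; infer_instance
def pvWitness_solution : Int × List Int × List Int := (2, [1, 2], [2, 1])
def Spec_solution (n : Int) (arr1 : List Int) (arr2 : List Int) (out : List String) : Prop := out = solution_alt n arr1 arr2
instance (n : Int) (arr1 : List Int) (arr2 : List Int) (out : List String) : Decidable (Spec_solution n arr1 arr2 out) := by unfold Spec_solution; infer_instance

-- ===== CLAIM (what is proved, stated in full; the proofs are below) =====
def Claim_equal_solution : Prop := ∀ (n : Int) (arr1 : List Int) (arr2 : List Int), Dom_solution n arr1 arr2 → Pre_solution n arr1 arr2 → Spec_solution n arr1 arr2 (solution n arr1 arr2)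

-- ===== LEMMAS AND PROOFS =====

def bitChar (b : Bool) : Char := if b then '1' else '0'

def blN (m : Nat) : Nat := PySem.Int.bitLength (m : Int)

def bitsF (m : Nat) : List Char :=
  if m < 2 then [Nat.digitChar m] else bitsF (m / 2) ++ [Nat.digitChar (m % 2)]
decreasing_by exact Nat.div_lt_self (by omega) (by omega)

lemma blN_lt (m : Nat) : m < 2 ^ blN m := by
  have h := PySem.Int.lt_two_pow_bitLength (m : Int)
  simpa [blN] using h

lemma blN_pos {m : Nat} (hm : 0 < m) : 0 < blN m := by
  by_contra h
  have h2 := blN_lt m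
  have : blN m = 0 := by omega
  rw [this] at h2
  simp at h2
  omega

lemma blN_div2 {m : Nat} (hm : 0 < m) : blN m = blN (m / 2) + 1 := by
  simpa [blN] using PySem.Int.bitLength_natCast hm

lemma toDigitsCore_two (fuel m : Nat) (acc : List Char) (h : m < fuel) :
    Nat.toDigitsCore 2 fuel m acc = bitsF m ++ acc := by
  induction fuel generalizing m acc with
  | zero => omega
  | succ f ih =>
    rw [Nat.toDigitsCore]
    by_cases h2 : m / 2 = 0
    · have hm2 : m < 2 := by omega
      simp only [h2, if_pos]
      rw [bitsF, if_pos hm2, Nat.mod_eq_of_lt hm2]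
      simp
    · have hm : 0 < m := by omega
      have hlt : m / 2 < m := Nat.div_lt_self hm one_lt_two
      simp only [h2, if_neg, ite_false]
      rw [ih _ _ (by omega)]
      conv_rhs => rw [bitsF]
      rw [if_neg (by omega)]
      simp

lemma toDigits_two (m : Nat) : Nat.toDigits 2 m = bitsF m := by
  rw [Nat.toDigits.eq_def, toDigitsCore_two _ _ _ (by omega), List.append_nil]

lemma digitChar_mod2 (m : Nat) : Nat.digitChar (m % 2) = bitChar (m.testBit 0) := by
  rcases Nat.mod_two_eq_zero_or_one m with h | h <;> simp [h, Nat.testBit_zero, bitChar, Nat.digitChar]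

lemma bitsF_eq (m : Nat) :
    bitsF m = (List.range (max 1 (blN m))).map
      (fun i => bitChar (m.testBit (max 1 (blN m) - 1 - i))) := by
  induction m using Nat.strong_induction_on with
  | _ m ih =>
    by_cases h2 : m < 2
    · interval_cases m
      · rw [bitsF, if_pos (by omega)]; decide
      · rw [bitsF, if_pos (by omega)]; decide
    · have hm : 0 < m := by omega
      have hd2 : m / 2 < m := Nat.div_lt_self hm one_lt_two
      have hd : 0 < m / 2 := by omega
      have hb : blN m = blN (m / 2) + 1 := blN_div2 hm
      have hb1 : 0 < blN (m / 2) := blN_pos hd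
      rw [bitsF, if_neg h2, ih (m / 2) hd2]
      have e1 : max 1 (blN (m / 2)) = blN (m / 2) := by omega
      have e2 : max 1 (blN m) = blN (m / 2) + 1 := by omega
      rw [e1, e2, List.range_succ, List.map_append]
      congr 1
      · apply List.map_congr_left
        intro i hi
        rw [List.mem_range] at hi
        have h3 : (m / 2).testBit (blN (m / 2) - 1 - i) = m.testBit (blN (m / 2) + 1 - 1 - i) := by
          rw [Nat.testBit_div_two]
          congr 1
          omega
        rw [h3]
      · have h4 : blN (m / 2) + 1 - 1 - blN (m / 2) = 0 := by omega
        simp only [List.map_cons, List.map_nil, h4]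
        rw [digitChar_mod2]

lemma zfill_toDigits (m : Nat) (n : Int) :
    PySem.Chars.zfill (Nat.toDigits 2 m) n
      = (List.range (max (max 1 (blN m)) n.toNat)).map
          (fun i => bitChar (m.testBit (max (max 1 (blN m)) n.toNat - 1 - i))) := by
  rw [toDigits_two, bitsF_eq]
  have hL : 1 ≤ max 1 (blN m) := le_max_left _ _
  have hlen : ((List.range (max 1 (blN m))).map
      (fun i => bitChar (m.testBit (max 1 (blN m) - 1 - i)))).length = max 1 (blN m) := by simp
  unfold PySem.Chars.zfill
  by_cases hw : n ≤ (((List.range (max 1 (blN m))).map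
      (fun i => bitChar (m.testBit (max 1 (blN m) - 1 - i)))).length : Int)
  · rw [if_pos hw]
    rw [hlen] at hw
    have hM : max (max 1 (blN m)) n.toNat = max 1 (blN m) := by omega
    rw [hM]
  · rw [if_neg hw]
    rw [hlen] at hw
    have hM : max (max 1 (blN m)) n.toNat = n.toNat := by omega
    rw [hM]
    have hcs : (List.range (max 1 (blN m))).map
        (fun i => bitChar (m.testBit (max 1 (blN m) - 1 - i)))
        = bitChar (m.testBit (max 1 (blN m) - 1)) ::
          ((List.range (max 1 (blN m))).map
            (fun i => bitChar (m.testBit (max 1 (blN m) - 1 - i)))).tail := by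
      rcases Nat.exists_eq_add_of_le hL with ⟨k, hk⟩
      rw [hk]
      rw [List.range_add]
      simp [List.range_succ_eq_map]
    rw [hcs]
    have hpm : ¬ (bitChar (m.testBit (max 1 (blN m) - 1)) = '+' ∨
                  bitChar (m.testBit (max 1 (blN m) - 1)) = '-') := by
      cases m.testBit (max 1 (blN m) - 1) <;> simp [bitChar]
    simp only [hpm, if_neg, ite_false]
    rw [← hcs]
    rw [hlen]
    apply List.ext_getElem
    · simp
      omega
    · intro i h1 h2
      rw [List.getElem_map, List.getElem_range]
      by_cases hi : i < n.toNat - max 1 (blN m)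
      · rw [List.getElem_append_left (by simpa using hi)]
        rw [List.getElem_replicate]
        have hfalse : m.testBit (n.toNat - 1 - i) = false := by
          apply Nat.testBit_eq_false_of_lt
          calc m < 2 ^ blN m := blN_lt m
          _ ≤ 2 ^ (n.toNat - 1 - i) := Nat.pow_le_pow_right (by norm_num) (by omega)
        rw [hfalse]
        rfl
      · have hlen2 : (List.replicate (n.toNat - (max 1 (blN m))) '0').length ≤ i := by
          simp
          omega
        rw [List.getElem_append_right hlen2]
        simp only [List.length_replicate, hlen]
        rw [List.getElem_map, List.getElem_range]
        congr 2
        have hi2 : i - (n.toNat - max 1 (blN m)) < max 1 (blN m) := by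
          simp at h1
          omega
        omega

lemma zfill_getD (m nn idx : Nat) (hidx : idx < nn) (d : Char) :
    (PySem.Chars.zfill (Nat.toDigits 2 m) (nn : Int)).getD idx d
      = bitChar (m.testBit (max (max 1 (blN m)) nn - 1 - idx)) := by
  rw [zfill_toDigits]
  have ht : ((nn : Int)).toNat = nn := Int.toNat_natCast nn
  rw [ht]
  have hlt : idx < ((List.range (max (max 1 (blN m)) nn)).map
      (fun i => bitChar (m.testBit (max (max 1 (blN m)) nn - 1 - i)))).length := by
    simp
    omega
  rw [List.getD_eq_getElem _ _ hlt, List.getElem_map, List.getElem_range]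

lemma ite_append_singleton {c : Prop} [Decidable c] (tmp : List Char) (a b : Char) :
    (if c then tmp ++ [a] else tmp ++ [b]) = tmp ++ [if c then a else b] := by
  split <;> rfl

lemma ofChars_bitChar_sum (x y : Bool) :
    ((PySem.Int.ofChars? [bitChar x]).getD 0 + (PySem.Int.ofChars? [bitChar y]).getD 0 ≥ 1)
      ↔ (x || y) = true := by
  cases x <;> cases y <;> decide

lemma slice_toBin (m : Nat) :
    PySem.List.slice (PySem.Int.toBinChars0b (m : Int)) (some 2) none = Nat.toDigits 2 m := by
  rw [PySem.List.slice_from _ (by norm_num)]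
  rw [PySem.Int.toBinChars0b, if_neg (by omega)]
  simp

lemma and_one_testBit (r k : Nat) : ((r >>> k) &&& 1 ≠ 0) ↔ r.testBit k = true := by
  simp [Nat.testBit, Nat.and_one_is_mod]

lemma cell_eq (nn qn : Nat) (a b : Int) (ha : 0 ≤ a) (hb : 0 ≤ b)
    (hba : (PySem.Int.bitLength a : Int) ≤ (nn : Int)) (hbb : (PySem.Int.bitLength b : Int) ≤ (nn : Int))
    (hq : qn < nn) :
    ((PySem.Int.ofChars? [PySem.List.pyGetD
        (PySem.Chars.zfill (PySem.List.slice (PySem.Int.toBinChars0b a) (some 2) none) (nn : Int)) (qn : Int) ' ']).getD 0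
     + (PySem.Int.ofChars? [PySem.List.pyGetD
        (PySem.Chars.zfill (PySem.List.slice (PySem.Int.toBinChars0b b) (some 2) none) (nn : Int)) (qn : Int) ' ']).getD 0 ≥ 1)
    ↔ PySem.Int.band ((PySem.Int.bor a b) >>> (((nn : Int) - 1 - (qn : Int)).toNat)) 1 ≠ 0 := by
  obtain ⟨ma, rfl⟩ : ∃ m : Nat, a = (m : Int) := ⟨a.toNat, (Int.toNat_of_nonneg ha).symm⟩
  obtain ⟨mb, rfl⟩ : ∃ m : Nat, b = (m : Int) := ⟨b.toNat, (Int.toNat_of_nonneg hb).symm⟩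
  have hla : blN ma ≤ nn := by exact_mod_cast hba
  have hlb : blN mb ≤ nn := by exact_mod_cast hbb
  rw [slice_toBin, slice_toBin]
  rw [PySem.List.pyGetD_natCast, PySem.List.pyGetD_natCast]
  rw [zfill_getD ma nn qn hq, zfill_getD mb nn qn hq]
  rw [ofChars_bitChar_sum]
  have hMa : max (max 1 (blN ma)) nn = nn := by omega
  have hMb : max (max 1 (blN mb)) nn = nn := by omega
  rw [hMa, hMb]
  -- right-hand side: push everything to Nat
  rw [PySem.Int.bor_natCast, ← Int.natCast_shiftRight]
  have h1 : (1 : Int) = ((1 : Nat) : Int) := rfl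
  rw [h1, PySem.Int.band_natCast]
  rw [Ne, Int.natCast_eq_zero, ← Ne, and_one_testBit]
  have hk : (((nn : Int) - ((1 : Nat) : Int) - (qn : Int)).toNat) = nn - 1 - qn := by omega
  rw [hk, Nat.testBit_lor]

-- ===== VERDICT (by name: the statement is the Claim_ definition above) =====
theorem solution_spec : Claim_equal_solution := by
  intro n arr1 arr2 _ hpre
  unfold Spec_solution solution solution_alt
  by_cases hn : n ≤ 0
  · have hnil : PySem.List.pyRange 0 n 1 = [] := by
      apply List.eq_nil_iff_forall_not_mem.mpr
      intro x hx
      rw [PySem.List.mem_pyRange_one] at hx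
      omega
    rw [hnil]
    rfl
  · obtain ⟨nn, rfl⟩ : ∃ m : Nat, n = (m : Int) := ⟨n.toNat, by omega⟩
    obtain ⟨h1, h2, hp1, hp2⟩ := hpre
    rw [Int.toNat_natCast] at hp1 hp2
    rw [PySem.List.foldl_prod_mk
      (fun (s : List (List Char)) (val : Int) => s ++
        [PySem.Chars.zfill (PySem.List.slice (PySem.Int.toBinChars0b (PySem.List.pyGetD arr1 val 0)) (some 2) none) (nn : Int)])
      (fun (s : List (List Char)) (val : Int) => s ++
        [PySem.Chars.zfill (PySem.List.slice (PySem.Int.toBinChars0b (PySem.List.pyGetD arr2 val 0)) (some 2) none) (nn : Int)])]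
    simp only [ite_append_singleton, PySem.List.foldl_append_singleton_eq_map, List.nil_append]
    apply List.map_congr_left
    intro place hmem
    rw [PySem.List.mem_pyRange_one] at hmem
    obtain ⟨pn, hpn, rfl⟩ : ∃ pn : Nat, pn < nn ∧ place = (pn : Int) :=
      ⟨place.toNat, by omega, by omega⟩
    apply congrArg
    apply List.map_congr_left
    intro idx hidx
    rw [PySem.List.mem_pyRange_one] at hidx
    obtain ⟨qn, hqn, rfl⟩ : ∃ qn : Nat, qn < nn ∧ idx = (qn : Int) :=
      ⟨idx.toNat, by omega, by omega⟩
    rw [PySem.List.pyGetD_map_pyRange _ nn pn _ hpn,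
        PySem.List.pyGetD_map_pyRange _ nn pn _ hpn]
    have hap : pn < arr1.length := by omega
    have hbp : pn < arr2.length := by omega
    have hmem1 : arr1[pn] ∈ arr1.take nn := by
      have ht := List.getElem_take (xs := arr1) (j := nn) (i := pn) (h := by simp; omega)
      rw [← ht]
      exact List.getElem_mem _
    have hmem2 : arr2[pn] ∈ arr2.take nn := by
      have ht := List.getElem_take (xs := arr2) (j := nn) (i := pn) (h := by simp; omega)
      rw [← ht]
      exact List.getElem_mem _
    obtain ⟨ha, hba⟩ := hp1 _ hmem1
    obtain ⟨hb, hbb⟩ := hp2 _ hmem2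
    have hg1 : PySem.List.pyGetD arr1 (pn : Int) 0 = arr1[pn] := by
      rw [PySem.List.pyGetD_natCast, List.getD_eq_getElem _ _ hap]
    have hg2 : PySem.List.pyGetD arr2 (pn : Int) 0 = arr2[pn] := by
      rw [PySem.List.pyGetD_natCast, List.getD_eq_getElem _ _ hbp]
    rw [hg1, hg2]
    exact if_congr (cell_eq nn qn arr1[pn] arr2[pn] ha hb hba hbb hqn) rfl rfl
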